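-- pv_equiv track=rewrite | github.com/ahnafshahriyarchow/Advance-Python-practice | practice 02.py | check_run_length
-- ===== SOURCE A (Python) =====
-- def check_run_length(trial_sequence, required_length):
--     run_count = 0
--     for outcome in trial_sequence:
--         if outcome == 1:
--             run_count += 1
--             if run_count >= required_length:
--                 return True
--         else:
--             run_count = 0
--     return False
-- ===== SOURCE B (Python) =====
-- def check_run_length(trial_sequence, required_length):
--     # Decompose the sequence into maximal runs of equal adjacent values,
--     # then ask whether some run of 1s is long enough.
--     runs = []
--     cur = None  # current run as (value, count)
--     for x in trial_sequence:
--         if cur is not None and cur[0] == x: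
--             cur = (x, cur[1] + 1)
--         else:
--             if cur is not None:
--                 runs.append(cur)
--             cur = (x, 1)
--     if cur is not None:
--         runs.append(cur)
--     return any(v == 1 and n >= required_length for v, n in runs)
-- ===== Notes on version B (the rewrite author's own statement) =====
-- stated objective: alternative
-- what changed: B first decomposes the sequence into maximal runs of equal adjacent values (a run-length encoding) and then checks with any() whether some run of 1s reaches required_length, instead of A's single scan with a reset counter and early return.
import Mathlib
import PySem

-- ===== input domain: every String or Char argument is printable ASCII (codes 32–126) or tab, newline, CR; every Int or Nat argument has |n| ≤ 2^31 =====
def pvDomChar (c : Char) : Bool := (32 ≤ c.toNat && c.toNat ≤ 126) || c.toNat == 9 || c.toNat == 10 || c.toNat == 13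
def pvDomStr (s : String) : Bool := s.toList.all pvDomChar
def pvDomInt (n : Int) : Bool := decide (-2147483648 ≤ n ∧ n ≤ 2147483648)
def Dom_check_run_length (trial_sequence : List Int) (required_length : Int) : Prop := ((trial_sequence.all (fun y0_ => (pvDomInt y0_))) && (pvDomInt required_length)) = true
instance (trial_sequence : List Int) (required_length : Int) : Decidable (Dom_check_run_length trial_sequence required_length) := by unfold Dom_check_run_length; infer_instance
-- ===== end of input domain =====

-- B re-implements the check via a run-length encoding followed by any(); same value on every input (objective: alternative).

-- ===== PORT A =====
-- A's loop with the resetting run_count and the early return, as structural recursion.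
def checkRunGo (xs : List Int) (run_count : Int) (required_length : Int) : Bool :=
  match xs with
  | [] => false
  | outcome :: rest =>
    if outcome = 1 then
      if run_count + 1 ≥ required_length then true
      else checkRunGo rest (run_count + 1) required_length
    else checkRunGo rest 0 required_length

def check_run_length (trial_sequence : List Int) (required_length : Int) : Bool :=
  checkRunGo trial_sequence 0 required_length

-- ===== PORT B =====
-- Source B's run-length encoder: carries the current run (value, count), emits it when the value changes.
def runsAux (k : Int) (n : Nat) (xs : List Int) : List (Int × Nat) :=
  match xs with
  | [] => [(k, n)]
  | x :: rest => if k = x then runsAux k (n + 1) rest else (k, n) :: runsAux x 1 rest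

def runsOf (xs : List Int) : List (Int × Nat) :=
  match xs with
  | [] => []
  | x :: rest => runsAux x 1 rest

def check_run_length_alt (trial_sequence : List Int) (required_length : Int) : Bool :=
  (runsOf trial_sequence).any (fun p => p.1 == 1 && decide (required_length ≤ (p.2 : Int)))

-- ===== PRECONDITION & SPEC =====
def Spec_check_run_length (trial_sequence : List Int) (required_length : Int) (out : Bool) : Prop := out = check_run_length_alt trial_sequence required_length
instance (trial_sequence : List Int) (required_length : Int) (out : Bool) : Decidable (Spec_check_run_length trial_sequence required_length out) := by unfold Spec_check_run_length; infer_instance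

-- ===== CLAIM (what is proved, stated in full; the proofs are below) =====
def Claim_equal_check_run_length : Prop := ∀ (trial_sequence : List Int) (required_length : Int), Dom_check_run_length trial_sequence required_length → Spec_check_run_length trial_sequence required_length (check_run_length trial_sequence required_length)

-- ===== LEMMAS AND PROOFS =====

theorem checkRunGo_cons (x : Int) (rest : List Int) (run req : Int) :
    checkRunGo (x :: rest) run req
      = if x = 1 then (if run + 1 ≥ req then true else checkRunGo rest (run + 1) req)
        else checkRunGo rest 0 req := rfl

theorem runsAux_cons (k : Int) (n : Nat) (x : Int) (rest : List Int) :
    runsAux k n (x :: rest)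
      = if k = x then runsAux k (n + 1) rest else (k, n) :: runsAux x 1 rest := rfl

-- If the carried run of 1s is already long enough, the any() over its runs is true.
theorem runsAux_any_of_ge (req : Int) (xs : List Int) (n : Nat) (hn : req ≤ (n : Int)) :
    (runsAux 1 n xs).any (fun p => p.1 == 1 && decide (req ≤ (p.2 : Int))) = true := by
  induction xs generalizing n with
  | nil => simp [runsAux, hn]
  | cons x rest ih =>
    rw [runsAux_cons]
    by_cases hx : (1 : Int) = x
    · rw [if_pos hx]; exact ih (n + 1) (by push_cast; omega)
    · rw [if_neg hx]; simp [hn]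

-- Main invariant: A's loop state (run_count = n if inside a run of 1s, else 0) matches
-- B's any() over the runs with the current run (k, n) still carried.
theorem checkRunGo_eq_runsAux (req : Int) (xs : List Int) (k : Int) (n : Nat)
    (h : k = 1 → (n : Int) < req) :
    checkRunGo xs (if k = 1 then (n : Int) else 0) req
      = (runsAux k n xs).any (fun p => p.1 == 1 && decide (req ≤ (p.2 : Int))) := by
  induction xs generalizing k n with
  | nil =>
    by_cases hk : k = 1
    · have := h hk
      simp only [checkRunGo, runsAux, List.any_cons, List.any_nil, Bool.or_false]
      simp [hk]; omega
    · simp [checkRunGo, runsAux, hk]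
  | cons x rest ih =>
    rw [checkRunGo_cons, runsAux_cons]
    by_cases hkx : k = x
    · subst hkx
      rw [if_pos rfl]
      by_cases hk : k = 1
      · subst hk
        rw [if_pos rfl, if_pos rfl]
        by_cases hge : (n : Int) + 1 ≥ req
        · rw [if_pos hge]
          exact (runsAux_any_of_ge req rest (n + 1) (by push_cast; omega)).symm
        · rw [if_neg hge]
          have := ih 1 (n + 1) (fun _ => by push_cast; omega)
          rw [if_pos rfl] at this
          push_cast at this
          exact this
      · simp only [if_neg hk]
        have := ih k (n + 1) (fun hk1 => absurd hk1 hk)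
        simp only [if_neg hk] at this
        exact this
    · rw [if_neg hkx]
      -- the emitted run (k, n) cannot satisfy the predicate, by h
      have hemit : ((k == 1 && decide (req ≤ (n : Int))) : Bool) = false := by
        by_cases hk : k = 1
        · have := h hk; simp [hk]; omega
        · simp [hk]
      rw [List.any_cons, hemit, Bool.false_or]
      by_cases hx : x = 1
      · subst hx
        have hk : ¬ k = 1 := hkx
        rw [if_neg hk, if_pos rfl]
        by_cases hge : (0 : Int) + 1 ≥ req
        · rw [if_pos hge]
          exact (runsAux_any_of_ge req rest 1 (by push_cast; omega)).symm
        · rw [if_neg hge]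
          have := ih 1 1 (fun _ => by omega)
          rw [if_pos rfl] at this
          push_cast at this ⊢
          exact this
      · simp only [if_neg hx]
        have := ih x 1 (fun hx1 => absurd hx1 hx)
        simp only [if_neg hx] at this
        exact this

-- ===== VERDICT (by name: the statement is the Claim_ definition above) =====
theorem check_run_length_spec : Claim_equal_check_run_length := by
  intro ts req _
  unfold Spec_check_run_length check_run_length check_run_length_alt
  cases ts with
  | nil => simp [checkRunGo, runsOf]
  | cons x rest =>
    simp only [runsOf]
    rw [checkRunGo_cons]
    by_cases hx : x = 1
    · rw [if_pos hx]
      by_cases hge : (0 : Int) + 1 ≥ req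
      · rw [if_pos hge]
        exact (runsAux_any_of_ge req rest 1 (by push_cast; omega)).symm ▸ (hx ▸ rfl)
      · rw [if_neg hge]
        have := checkRunGo_eq_runsAux req rest 1 1 (fun _ => by omega)
        rw [if_pos rfl] at this
        push_cast at this ⊢
        exact hx ▸ this
    · rw [if_neg hx]
      have := checkRunGo_eq_runsAux req rest x 1 (fun hx1 => absurd hx1 hx)
      rw [if_neg hx] at this
      exact this
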